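-- pv_equiv track=rewrite | github.com/StarsExpress/LeetCode-Repository | sorting/heroes_power.py | compute_heroes_power
-- ===== SOURCE A (Python) =====
-- def compute_heroes_power(numbers: list[int]) -> int:  # LeetCode Q.2681.
--     """
--     Key: after sorting, for jth number,
--     weighted maximums = 1 * (numbers[j + 1] ** 2) + ...... + 2 ** (i - 2) * (numbers[i] ** 2).
--
--     (j + 1)th number's weighted maximums = (jth number's weighted maximums - (j + 1)th number) // 2.
--     """
--     total_nums = len(numbers)
--     if len(set(numbers)) == 1:  # All duplicates. Required to control size.
--         return (2 ** total_nums - 1) * (numbers[0] ** 3) % (10 ** 9 + 7)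
--
--     numbers.sort()
--     weighted_maximums, weight = 0, 1
--     for number in numbers[1:]:  # Docstring's formula doesn't contain 0th number.
--         weighted_maximums += weight * number ** 2
--         weight *= 2
--
--     heroes_power = 0
--     for idx, number in enumerate(numbers):
--         heroes_power += weighted_maximums * number
--         heroes_power += number ** 3  # The subsequence of number itself.
--
--         if idx < total_nums - 1:  # Not last number: adjust weighted maximums.
--             weighted_maximums -= numbers[idx + 1] ** 2
--             weighted_maximums //= 2
--
--     return heroes_power % (10 ** 9 + 7)  # Required to control size.
-- ===== SOURCE B (Python) =====
-- def compute_heroes_power(numbers: list[int]) -> int:  # LeetCode Q.2681.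
--     # One modular left-to-right pass over the sorted list: for each x (as group maximum),
--     # add x^2 * (x + s) where s = sum of earlier elements y weighted 2^(gap-1), kept mod p.
--     # Does not mutate the input (A sorts it in place); same return value.
--     p = 10 ** 9 + 7
--     ans = 0
--     s = 0
--     for x in sorted(numbers):
--         ans = (ans + x * x * (x + s)) % p
--         s = (2 * s + x) % p
--     return ans
-- ===== Notes on version B (the rewrite author's own statement) =====
-- stated objective: faster
-- what changed: Replaces A's exact big-integer bookkeeping (a huge weighted sum built once and then repeatedly adjusted with subtraction and //2, plus a special all-duplicates branch) by a single left-to-right pass over the sorted list keeping all quantities reduced mod 1e9+7, so every arithmetic operation is on machine-sized numbers.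
import Mathlib
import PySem

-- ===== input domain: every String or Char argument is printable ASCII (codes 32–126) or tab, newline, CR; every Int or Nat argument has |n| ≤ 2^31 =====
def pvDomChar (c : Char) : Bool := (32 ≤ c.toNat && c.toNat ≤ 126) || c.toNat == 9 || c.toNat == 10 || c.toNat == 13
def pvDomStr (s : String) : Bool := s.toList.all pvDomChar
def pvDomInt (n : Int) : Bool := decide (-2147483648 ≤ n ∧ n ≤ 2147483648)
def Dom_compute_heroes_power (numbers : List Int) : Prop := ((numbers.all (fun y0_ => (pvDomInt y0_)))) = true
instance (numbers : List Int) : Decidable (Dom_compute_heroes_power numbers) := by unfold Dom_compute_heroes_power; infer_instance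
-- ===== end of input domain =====

-- B replaces A's exact big-integer accumulation (and its all-duplicates shortcut branch) by one
-- modular left-to-right pass over the sorted list; equivalence is about the RETURN value only
-- (Python A sorts its argument in place, B does not mutate it).

-- ===== PORT A =====
-- second loop of A: structural recursion over the remaining sorted list with state
-- (heroes_power, weighted_maximums); the 'idx < total_nums - 1' guard and the access
-- numbers[idx + 1] become the two-element pattern (the next element is y).
def chpLoop2 : List Int → Int → Int → Int
  | [], hp, _ => hp
  | [x], hp, wm => hp + wm * x + x ^ 3
  | x :: y :: rest, hp, wm =>
      chpLoop2 (y :: rest) (hp + wm * x + x ^ 3) (PySem.Int.floordiv (wm - y ^ 2) 2)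

def compute_heroes_power (numbers : List Int) : Int :=
  if (PySem.Set.ofList numbers).length = 1 then
    -- numbers[0]: in range here (the set is nonempty, so the list is); default never used
    PySem.Int.mod ((2 ^ numbers.length - 1) * (PySem.List.pyGetD numbers 0 0) ^ 3) 1000000007
  else
    let sortedNums := PySem.List.sorted numbers (fun x => x) false
    -- first loop over numbers[1:] with state (weighted_maximums, weight)
    let wmw := (PySem.List.slice sortedNums (some 1) none).foldl
        (fun (st : Int × Int) n => (st.1 + st.2 * n ^ 2, st.2 * 2)) (0, 1)
    PySem.Int.mod (chpLoop2 sortedNums 0 wmw.1) 1000000007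

-- ===== PORT B =====
-- loop body of Source B: state (ans, s), both kept reduced mod p
def chpAltStep (st : Int × Int) (x : Int) : Int × Int :=
  (PySem.Int.mod (st.1 + x * x * (x + st.2)) 1000000007,
   PySem.Int.mod (2 * st.2 + x) 1000000007)

def compute_heroes_power_alt (numbers : List Int) : Int :=
  ((PySem.List.sorted numbers (fun x => x) false).foldl chpAltStep (0, 0)).1

-- ===== PRECONDITION & SPEC =====
def Spec_compute_heroes_power (numbers : List Int) (out : Int) : Prop := out = compute_heroes_power_alt numbers
instance (numbers : List Int) (out : Int) : Decidable (Spec_compute_heroes_power numbers out) := by unfold Spec_compute_heroes_power; infer_instance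

-- ===== CLAIM (what is proved, stated in full; the proofs are below) =====
def Claim_equal_compute_heroes_power : Prop := ∀ (numbers : List Int), Dom_compute_heroes_power numbers → Spec_compute_heroes_power numbers (compute_heroes_power numbers)

-- ===== LEMMAS AND PROOFS =====

-- exact (non-modular) weighted sum of squares of a list: chpM [a1,...] = Σ 2^(k) a_{k+1}^2 … = a1^2 + 2*chpM rest
def chpM : List Int → Int
  | [] => 0
  | y :: ys => y ^ 2 + 2 * chpM ys

-- exact total power of a (sorted) list
def chpT : List Int → Int
  | [] => 0
  | x :: xs => x ^ 3 + x * chpM xs + chpT xs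

theorem chp_loop1_eq (xs : List Int) : ∀ (wm w : Int),
    (xs.foldl (fun (st : Int × Int) n => (st.1 + st.2 * n ^ 2, st.2 * 2)) (wm, w)).1
      = wm + w * chpM xs := by
  induction xs with
  | nil => intro wm w; simp [chpM]
  | cons x xs ih =>
      intro wm w
      simp only [List.foldl_cons, chpM]
      rw [ih]
      ring

theorem chp_floordiv_two (m : Int) : PySem.Int.floordiv (2 * m) 2 = m := by
  rw [PySem.Int.floordiv_eq_ediv_of_pos (by norm_num)]
  omega

theorem chpLoop2_eq : ∀ (xs : List Int) (hp : Int),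
    chpLoop2 xs hp (chpM xs.tail) = hp + chpT xs
  | [], hp => by simp [chpLoop2, chpT]
  | [x], hp => by simp [chpLoop2, chpT, chpM]
  | x :: y :: rest, hp => by
      have hdiv : PySem.Int.floordiv (chpM (y :: rest) - y ^ 2) 2 = chpM rest := by
        have : chpM (y :: rest) - y ^ 2 = 2 * chpM rest := by simp [chpM]
        rw [this, chp_floordiv_two]
      have ih := chpLoop2_eq (y :: rest) (hp + chpM (y :: rest) * x + x ^ 3)
      simp only [List.tail_cons] at ih ⊢
      rw [chpLoop2, hdiv, ih]
      simp only [chpT, chpM]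
      ring

-- exact (non-modular) version of B's loop
def chpE : List Int → Int → Int → Int
  | [], a, _ => a
  | x :: xs, a, s => chpE xs (a + x * x * (x + s)) (2 * s + x)

theorem chpE_eq (xs : List Int) : ∀ (a s : Int), chpE xs a s = a + chpT xs + s * chpM xs := by
  induction xs with
  | nil => intro a s; simp [chpE, chpT, chpM]
  | cons x xs ih =>
      intro a s
      rw [chpE, ih]
      simp only [chpT, chpM]
      ring

theorem chp_mod_emod (a : Int) : PySem.Int.mod a 1000000007 = a % 1000000007 :=
  PySem.Int.mod_eq_emod_of_pos (by norm_num)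

theorem chp_foldl_mod (xs : List Int) : ∀ (a s : Int),
    (xs.foldl chpAltStep (a % 1000000007, s % 1000000007)).1
      = chpE xs a s % 1000000007 := by
  induction xs with
  | nil =>
      intro a s
      simp [chpE]
  | cons x xs ih =>
      intro a s
      have ha : Int.ModEq 1000000007 (a % 1000000007) a :=
        Int.emod_emod_of_dvd a (dvd_refl _)
      have hs : Int.ModEq 1000000007 (s % 1000000007) s :=
        Int.emod_emod_of_dvd s (dvd_refl _)
      have h1 : (a % 1000000007 + x * x * (x + s % 1000000007)) % 1000000007
          = (a + x * x * (x + s)) % 1000000007 :=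
        ha.add ((Int.ModEq.refl (x * x)).mul ((Int.ModEq.refl x).add hs))
      have h2 : (2 * (s % 1000000007) + x) % 1000000007 = (2 * s + x) % 1000000007 :=
        (((Int.ModEq.refl (2 : Int)).mul hs).add (Int.ModEq.refl x))
      simp only [List.foldl_cons, chpAltStep, chp_mod_emod, h1, h2, chpE]
      exact ih _ _

-- B's port equals the exact total mod p, for ANY list in place of the sorted one
theorem chp_alt_eq_T (l : List Int) :
    (l.foldl chpAltStep (0, 0)).1 = chpT l % 1000000007 := by
  have h0 : ((0 : Int), (0 : Int)) = ((0 : Int) % 1000000007, (0 : Int) % 1000000007) := by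
    norm_num
  rw [h0, chp_foldl_mod, chpE_eq]
  norm_num

theorem chpM_replicate (a : Int) : ∀ (n : Nat),
    chpM (List.replicate n a) = (2 ^ n - 1) * a ^ 2
  | 0 => by simp [chpM]
  | n + 1 => by
      simp only [List.replicate_succ, chpM, chpM_replicate a n, pow_succ]
      ring

theorem chpT_replicate (a : Int) : ∀ (n : Nat),
    chpT (List.replicate n a) = (2 ^ n - 1) * a ^ 3
  | 0 => by simp [chpT]
  | n + 1 => by
      simp only [List.replicate_succ, chpT, chpT_replicate a n, chpM_replicate, pow_succ]
      ring

theorem chp_replicate_pairwise (a : Int) (n : Nat) :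
    (List.replicate n a).Pairwise (fun p q : Int => id p ≤ id q) := by
  induction n with
  | zero => simp
  | succ n ih =>
      rw [List.replicate_succ, List.pairwise_cons]
      exact ⟨fun b hb => by rw [List.eq_of_mem_replicate hb], ih⟩

-- all-duplicates: the list is a replicate of its head
theorem chp_ofList_singleton {numbers : List Int} {a : Int}
    (h : PySem.Set.ofList numbers = [a]) :
    numbers = List.replicate numbers.length a := by
  apply List.eq_replicate_of_mem
  intro b hb
  have : b ∈ PySem.Set.ofList numbers := (PySem.Set.mem_ofList numbers b).mpr hb
  rw [h] at this
  simpa using this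

theorem chp_main (numbers : List Int) :
    compute_heroes_power numbers = compute_heroes_power_alt numbers := by
  unfold compute_heroes_power compute_heroes_power_alt
  by_cases hdup : (PySem.Set.ofList numbers).length = 1
  · simp only [hdup, if_pos]
    obtain ⟨a, ha⟩ : ∃ a, PySem.Set.ofList numbers = [a] := by
      match hh : PySem.Set.ofList numbers, hdup' : (PySem.Set.ofList numbers).length with
      | [a], _ => exact ⟨a, rfl⟩
      | [], _ => rw [hh] at hdup; simp at hdup
      | a :: b :: t, _ => rw [hh] at hdup; simp at hdup
    have hrep := chp_ofList_singleton ha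
    have hsorted : PySem.List.sorted numbers (fun x => x) false = numbers := by
      apply PySem.List.sorted_eq_self_of_pairwise
      rw [hrep] at *
      exact chp_replicate_pairwise a numbers.length
    rw [hsorted, hrep, chp_alt_eq_T, chpT_replicate, List.length_replicate]
    have hpos : 0 < numbers.length := by
      rcases numbers with _ | ⟨x, xs⟩
      · simp [PySem.Set.ofList] at ha
      · simp
    have hget : PySem.List.pyGetD (List.replicate numbers.length a) 0 0 = a := by
      rcases hn : numbers.length with _ | m
      · omega
      · rw [List.replicate_succ, PySem.List.pyGetD_zero_cons]
    rw [hget, chp_mod_emod]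
  · simp only [hdup, if_neg, not_false_iff]
    rw [chp_loop1_eq]
    have hslice : PySem.List.slice (PySem.List.sorted numbers (fun x => x) false) (some 1) none
        = (PySem.List.sorted numbers (fun x => x) false).tail :=
      PySem.List.slice_from_one _
    rw [hslice]
    have := chpLoop2_eq (PySem.List.sorted numbers (fun x => x) false) 0
    rw [show (0 : Int) + 1 * chpM (PySem.List.sorted numbers (fun x => x) false).tail
          = chpM (PySem.List.sorted numbers (fun x => x) false).tail by ring]
    rw [this, chp_alt_eq_T, chp_mod_emod]
    norm_num

-- ===== VERDICT (by name: the statement is the Claim_ definition above) =====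
theorem compute_heroes_power_spec : Claim_equal_compute_heroes_power := by
  intro numbers _
  unfold Spec_compute_heroes_power
  exact chp_main numbers
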